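-- pv_equiv track=rewrite | github.com/Carath/Advent-of-Code | 2020/AoC_2020_4.py | get_pid_status
-- ===== SOURCE A (Python) =====
-- def get_pid_status(value):
-- 	if len(value) != 9:
-- 		return False
-- 	for i in range(0, len(value)):
-- 		c = ord(value[i]) # ascii code
-- 		if not c in range(48, 58): # in 0 ... 9
-- 			return False
-- 	return True
-- ===== SOURCE B (Python) =====
-- def get_pid_status(value):
--     # Single recursive pass: consume one character at a time while counting,
--     # never precomputing the length; stop early once more than 9 chars seen.
--     def go(s, k):
--         if s == "":
--             return k == 9
--         if k >= 9:
--             return False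
--         return '0' <= s[0] <= '9' and go(s[1:], k + 1)
--     return go(value, 0)
-- ===== Notes on version B (the rewrite author's own statement) =====
-- stated objective: alternative
-- what changed: Replaces A's upfront length guard plus index loop with ord-range checks by a single recursive pass that consumes the string character by character while counting, deciding length-9 only when the string is exhausted and cutting off after 9 characters.
import Mathlib
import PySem

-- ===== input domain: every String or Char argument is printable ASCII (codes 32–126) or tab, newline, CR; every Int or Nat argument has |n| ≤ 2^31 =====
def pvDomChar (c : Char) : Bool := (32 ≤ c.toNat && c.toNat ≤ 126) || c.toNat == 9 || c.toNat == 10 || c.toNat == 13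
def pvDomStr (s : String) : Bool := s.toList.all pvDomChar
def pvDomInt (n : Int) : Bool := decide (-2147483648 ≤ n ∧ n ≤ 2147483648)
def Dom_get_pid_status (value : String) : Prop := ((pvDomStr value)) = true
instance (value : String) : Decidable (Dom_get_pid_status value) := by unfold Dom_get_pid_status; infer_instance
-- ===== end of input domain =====

-- B replaces A's upfront length guard + index loop (per-character ord range check)
-- by a single recursive pass consuming the string with a counter — alternative decomposition.

-- ===== PORT A =====
-- the 'for i in range(0, len(value))' loop with its early 'return False'
def pvALoop (value : String) : List Int → Bool
  | [] => true
  | i :: rest =>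
    match PySem.Str.pyGet? value i with
    | none => false   -- IndexError: unreachable, i ranges over range(0, len(value))
    | some ch =>
      let c : Int := (ch.toNat : Int)
      if ¬ (48 ≤ c ∧ c < 58) then false else pvALoop value rest

def get_pid_status (value : String) : Bool :=
  if PySem.Str.len value ≠ 9 then false
  else pvALoop value (PySem.List.pyRange 0 (PySem.Str.len value) 1)

-- ===== PORT B =====
-- 'def go(s, k)': recursion over the string (as its character list) with counter k
def pvBGo : List Char → Int → Bool
  | [], k => k == 9
  | c :: rest, k =>
    if k ≥ 9 then false
    else (decide ('0' ≤ c) && decide (c ≤ '9')) && pvBGo rest (k + 1)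

def get_pid_status_alt (value : String) : Bool :=
  pvBGo value.toList 0

-- ===== PRECONDITION & SPEC =====
def Spec_get_pid_status (value : String) (out : Bool) : Prop := out = get_pid_status_alt value
instance (value : String) (out : Bool) : Decidable (Spec_get_pid_status value out) := by unfold Spec_get_pid_status; infer_instance

-- ===== CLAIM (what is proved, stated in full; the proofs are below) =====
def Claim_equal_get_pid_status : Prop := ∀ (value : String), Dom_get_pid_status value → Spec_get_pid_status value (get_pid_status value)

-- ===== LEMMAS AND PROOFS =====

theorem pvIsdigit_iff (c : Char) :
    PySem.Chars.isdigit c = true ↔ (48 ≤ (c.toNat : Int) ∧ (c.toNat : Int) < 58) := by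
  unfold PySem.Chars.isdigit
  rw [Bool.and_eq_true, decide_eq_true_iff, decide_eq_true_iff, Char.le_def, Char.le_def,
      UInt32.le_iff_toNat_le, UInt32.le_iff_toNat_le]
  have hc : Char.toNat c = c.val.toNat := rfl
  have h0 : ('0' : Char).val.toNat = 48 := rfl
  have h9 : ('9' : Char).val.toNat = 57 := rfl
  rw [h0, h9, ← hc]
  omega

theorem pvBdigit_eq_isdigit (c : Char) :
    (decide ('0' ≤ c) && decide (c ≤ '9')) = PySem.Chars.isdigit c := rfl

theorem pvALoop_eq_all (value : String) (k : Nat) (hk : k ≤ value.toList.length) :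
    pvALoop value (PySem.List.pyRange (k : Int) (PySem.Str.len value) 1)
      = (value.toList.drop k).all PySem.Chars.isdigit := by
  induction h : value.toList.length - k generalizing k with
  | zero =>
    have hk' : k = value.toList.length := by omega
    rw [PySem.List.pyRange_one_eq_nil (by simp only [PySem.Str.len]; omega),
        List.drop_eq_nil_of_le hk'.ge]
    simp [pvALoop]
  | succ n ih =>
    have hlt : k < value.toList.length := by omega
    rw [PySem.List.pyRange_one_cons (by simp only [PySem.Str.len]; exact_mod_cast hlt)]
    have hget : PySem.Str.pyGet? value (k : Int) = some (value.toList[k]'hlt) := by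
      simp [PySem.Str.pyGet?, List.getElem?_eq_getElem hlt]
    have hdrop : value.toList.drop k = value.toList[k]'hlt :: value.toList.drop (k + 1) :=
      List.drop_eq_getElem_cons hlt
    simp only [pvALoop, hget, hdrop, List.all_cons]
    have hpush : ((k : Int) + 1) = ((k + 1 : Nat) : Int) := by push_cast; ring
    by_cases hd : 48 ≤ (value.toList[k]'hlt).toNat ∧ (value.toList[k]'hlt).toNat < 58
    · have hdig : PySem.Chars.isdigit (value.toList[k]'hlt) = true :=
        (pvIsdigit_iff _).mpr (by omega)
      rw [if_neg (by omega), hpush, hdig]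
      simp only [Bool.true_and]
      exact ih (k + 1) (by omega) (by omega)
    · have hdig : PySem.Chars.isdigit (value.toList[k]'hlt) = false := by
        cases hcase : PySem.Chars.isdigit (value.toList[k]'hlt)
        · rfl
        · exact absurd ((pvIsdigit_iff _).mp hcase) (by omega)
      rw [if_pos (by omega), hdig]
      simp

theorem pvBGo_eq (l : List Char) (k : Int) (hk : 0 ≤ k) (hk9 : k ≤ 9) :
    pvBGo l k = (decide ((l.length : Int) + k = 9) && l.all PySem.Chars.isdigit) := by
  induction l generalizing k with
  | nil =>
    simp only [pvBGo, List.length_nil, List.all_nil, Nat.cast_zero, zero_add, Bool.and_true]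
    rfl
  | cons c rest ih =>
    simp only [pvBGo, List.length_cons, List.all_cons]
    by_cases hge : k ≥ 9
    · rw [if_pos hge]
      simp only [Bool.false_eq, Bool.and_eq_false_iff]
      left
      exact decide_eq_false (by push_cast; omega)
    · rw [if_neg hge, pvBdigit_eq_isdigit, ih (k + 1) (by omega) (by omega)]
      have hlen : (((rest.length + 1 : Nat) : Int) + k = 9) ↔ ((rest.length : Int) + (k + 1) = 9) := by
        push_cast; omega
      cases hd : PySem.Chars.isdigit c <;> cases hl : decide ((rest.length : Int) + (k + 1) = 9) <;>
        simp_all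

-- ===== VERDICT (by name: the statement is the Claim_ definition above) =====
theorem get_pid_status_spec : Claim_equal_get_pid_status := by
  intro value _
  unfold Spec_get_pid_status get_pid_status get_pid_status_alt
  have hl : PySem.Str.len value = (value.toList.length : Int) := rfl
  rw [pvBGo_eq value.toList 0 (by omega) (by omega)]
  by_cases h9 : value.toList.length = 9
  · have hlen : PySem.Str.len value = 9 := by rw [hl]; exact_mod_cast h9
    rw [if_neg (not_not_intro hlen)]
    have hall := pvALoop_eq_all value 0 (by omega)
    simp only [Nat.cast_zero, List.drop_zero] at hall
    rw [hall, h9]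
    simp
  · have hlen : PySem.Str.len value ≠ 9 := by
      rw [hl]; intro hc; exact h9 (by exact_mod_cast hc)
    rw [if_pos hlen]
    simp only [Bool.false_eq, Bool.and_eq_false_iff]
    left
    exact decide_eq_false (by intro hc; exact h9 (by omega))
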